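-- pv_equiv track=rewrite | github.com/baicaipaoshui/deep_rag | app/orchestrator/query_analyzer.py | _merge_keywords
-- ===== SOURCE A (Python) =====
-- def _merge_keywords(primary: list[str], secondary: list[str], max_count: int = 8) -> list[str]:
--     merged: list[str] = []
--     for group in (primary, secondary):
--         for token in group:
--             t = str(token).strip()
--             if len(t) < 2 or t in merged:
--                 continue
--             merged.append(t)
--             if len(merged) >= max_count:
--                 return merged
--     return merged
-- ===== SOURCE B (Python) =====
-- def _merge_keywords(primary: list[str], secondary: list[str], max_count: int = 8) -> list[str]:
--     cleaned = [t for t in (str(x).strip() for x in primary + secondary) if len(t) >= 2]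
--     distinct = set(cleaned)
--     return sorted(distinct, key=cleaned.index)[:max_count]
-- ===== Notes on version B (the rewrite author's own statement) =====
-- stated objective: alternative
-- what changed: Instead of A's single left-to-right pass that tests 't in merged' and early-returns at the cap, B collects the stripped len>=2 tokens, forms an UNORDERED set of them, reconstructs the order by sorting the set with key=cleaned.index (first-occurrence position), and caps with a trailing slice.
-- intended difference: For max_count <= 0 with at least one token whose stripped form has length >= 2, A still returns a one-element list with the first such token (its cap check only fires after an append), while B applies the cap as a slice (empty for max_count = 0), honoring the requested cap on this unspecified corner. — e.g. on _merge_keywords(["ab"], ([], 0)): A returns ["ab"], B returns []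
import Mathlib
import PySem

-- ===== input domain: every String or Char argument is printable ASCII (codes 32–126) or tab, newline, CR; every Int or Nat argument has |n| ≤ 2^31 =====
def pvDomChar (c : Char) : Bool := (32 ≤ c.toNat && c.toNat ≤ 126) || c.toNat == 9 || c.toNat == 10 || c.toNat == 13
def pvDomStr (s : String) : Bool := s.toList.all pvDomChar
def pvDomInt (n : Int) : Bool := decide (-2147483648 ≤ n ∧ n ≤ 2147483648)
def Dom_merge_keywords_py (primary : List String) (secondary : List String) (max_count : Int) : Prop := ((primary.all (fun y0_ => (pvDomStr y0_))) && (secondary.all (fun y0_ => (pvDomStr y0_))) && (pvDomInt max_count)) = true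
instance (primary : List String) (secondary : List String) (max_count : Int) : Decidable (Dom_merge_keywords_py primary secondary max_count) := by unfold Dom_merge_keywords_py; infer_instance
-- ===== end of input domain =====

-- B replaces A's single ordered pass with early return and linear 't in merged' scan by
-- an UNORDERED set of the cleaned tokens reordered via sorting on key=cleaned.index
-- (first-occurrence position), then a trailing [:max_count] slice; for max_count ≤ 0
-- (an unspecified corner) A still returns one token while B honors the cap — stated as
-- the intended difference D_ below.


-- ===== PORT A =====
-- inner 'for token in group' loop; the Bool flag is the early 'return merged'
def mergeLoop (mc : Int) (merged : List String) : List String → List String × Bool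
  | [] => (merged, false)
  | token :: rest =>
    let t := PySem.Str.strip token
    if PySem.Str.len t < 2 ∨ t ∈ merged then
      mergeLoop mc merged rest
    else
      let merged' := merged ++ [t]
      if mc ≤ (merged'.length : Int) then (merged', true)
      else mergeLoop mc merged' rest

def merge_keywords_py (primary : List String) (secondary : List String) (max_count : Int) : List String :=
  let r1 := mergeLoop max_count [] primary
  if r1.2 then r1.1
  else (mergeLoop max_count r1.1 secondary).1

-- ===== PORT B =====
-- sorted(distinct, key=cleaned.index): every element of the set is in cleaned, so
-- cleaned.index never raises; its value is (index? cleaned t).getD 0 on those inputs.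
def merge_keywords_py_alt (primary : List String) (secondary : List String) (max_count : Int) : List String :=
  let cleaned := ((primary ++ secondary).map (fun x => PySem.Str.strip x)).filter (fun t => 2 ≤ PySem.Str.len t)
  let distinct := PySem.Set.ofList cleaned
  PySem.List.slice
    (PySem.List.sorted distinct (fun t => (((PySem.List.index? cleaned t).getD 0 : Nat) : Int)) false)
    none (some max_count)

-- ===== PRECONDITION & SPEC =====
-- For max_count ≤ 0 with at least one token whose stripped form has length ≥ 2, A still
-- returns a one-element list with the first such token (its cap check only fires after an
-- append), while B applies the cap as a slice (empty for max_count = 0), honoring the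
-- requested cap on this unspecified corner.
def D_merge_keywords_py (primary : List String) (secondary : List String) (max_count : Int) : Prop :=
  max_count ≤ 0 ∧ ∃ t ∈ primary ++ secondary, 2 ≤ PySem.Str.len (PySem.Str.strip t)
instance (primary : List String) (secondary : List String) (max_count : Int) : Decidable (D_merge_keywords_py primary secondary max_count) := by unfold D_merge_keywords_py; infer_instance

def Spec_merge_keywords_py (primary : List String) (secondary : List String) (max_count : Int) (out : List String) : Prop := ¬ D_merge_keywords_py primary secondary max_count → out = merge_keywords_py_alt primary secondary max_count
instance (primary : List String) (secondary : List String) (max_count : Int) (out : List String) : Decidable (Spec_merge_keywords_py primary secondary max_count out) := by unfold Spec_merge_keywords_py; infer_instance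

def pvDiffWitness_merge_keywords_py : List String × List String × Int := (["ab"], ([], 0))
def pvDiffWitnessOut_merge_keywords_py : (List String) × (List String) := (["ab"], [])

-- ===== CLAIM (what is proved, stated in full; the proofs are below) =====
def Claim_unchanged_merge_keywords_py : Prop := ∀ (primary : List String) (secondary : List String) (max_count : Int), Dom_merge_keywords_py primary secondary max_count → Spec_merge_keywords_py primary secondary max_count (merge_keywords_py primary secondary max_count)
def Claim_changed_merge_keywords_py : Prop := Dom_merge_keywords_py (pvDiffWitness_merge_keywords_py.1) (pvDiffWitness_merge_keywords_py.2.1) (pvDiffWitness_merge_keywords_py.2.2) ∧ D_merge_keywords_py (pvDiffWitness_merge_keywords_py.1) (pvDiffWitness_merge_keywords_py.2.1) (pvDiffWitness_merge_keywords_py.2.2) ∧ merge_keywords_py (pvDiffWitness_merge_keywords_py.1) (pvDiffWitness_merge_keywords_py.2.1) (pvDiffWitness_merge_keywords_py.2.2) = pvDiffWitnessOut_merge_keywords_py.1 ∧ merge_keywords_py_alt (pvDiffWitness_merge_keywords_py.1) (pvDiffWitness_merge_keywords_py.2.1) (pvDiffWitness_merge_keywords_py.2.2) = pvDiffWitnessOut_merge_keywords_py.2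 ∧ pvDiffWitnessOut_merge_keywords_py.1 ≠ pvDiffWitnessOut_merge_keywords_py.2

-- ===== LEMMAS AND PROOFS =====

-- the cleaned token stream B works on
def cleanL (ts : List String) : List String :=
  (ts.map (fun x => PySem.Str.strip x)).filter (fun t => 2 ≤ PySem.Str.len t)

-- B's sort key: first-occurrence index in the cleaned list
def fIdx (cleaned : List String) (t : String) : Int :=
  (((PySem.List.index? cleaned t).getD 0 : Nat) : Int)

theorem cleanL_cons (x : String) (ts : List String) :
    cleanL (x :: ts) = if 2 ≤ PySem.Str.len (PySem.Str.strip x)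
      then PySem.Str.strip x :: cleanL ts else cleanL ts := by
  simp only [cleanL, List.map_cons, List.filter_cons, decide_eq_true_eq]

theorem prefix_update (l s : List String) : s <+: PySem.Set.update s l := by
  induction l generalizing s with
  | nil => simp [PySem.Set.update_nil]
  | cons x l ih =>
    rw [PySem.Set.update_cons]
    refine List.IsPrefix.trans ?_ (ih _)
    rw [PySem.Set.add_eq_ite]
    split
    · exact List.prefix_refl s
    · exact ⟨[x], rfl⟩

theorem mergeLoop_eq_take (mc : Int) : ∀ (ts merged : List String),
    (merged.length : Int) < mc →
    (mergeLoop mc merged ts).1 = (PySem.Set.update merged (cleanL ts)).take mc.toNat := by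
  intro ts
  induction ts with
  | nil =>
    intro merged h
    simp only [mergeLoop, cleanL, List.map_nil, List.filter_nil, PySem.Set.update_nil]
    exact (List.take_of_length_le (by omega)).symm
  | cons token rest ih =>
    intro merged h
    by_cases hlen : PySem.Str.len (PySem.Str.strip token) < 2
    · have h1 : cleanL (token :: rest) = cleanL rest := by
        rw [cleanL_cons, if_neg (by omega)]
      have h2 : mergeLoop mc merged (token :: rest) = mergeLoop mc merged rest := by
        simp only [mergeLoop]; rw [if_pos (Or.inl hlen)]
      rw [h1, h2]; exact ih merged h
    · have h1 : cleanL (token :: rest) = PySem.Str.strip token :: cleanL rest := by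
        rw [cleanL_cons, if_pos (by omega)]
      rw [h1, PySem.Set.update_cons]
      by_cases hmem : PySem.Str.strip token ∈ merged
      · have h2 : mergeLoop mc merged (token :: rest) = mergeLoop mc merged rest := by
          simp only [mergeLoop]; rw [if_pos (Or.inr hmem)]
        rw [h2, PySem.Set.add_of_mem hmem]; exact ih merged h
      · rw [PySem.Set.add_of_not_mem hmem]
        have h2 : mergeLoop mc merged (token :: rest) =
            (if mc ≤ ((merged ++ [PySem.Str.strip token]).length : Int)
              then (merged ++ [PySem.Str.strip token], true)
              else mergeLoop mc (merged ++ [PySem.Str.strip token]) rest) := by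
          simp only [mergeLoop]; rw [if_neg (not_or_intro hlen hmem)]
        rw [h2]
        by_cases hcap : mc ≤ ((merged ++ [PySem.Str.strip token]).length : Int)
        · rw [if_pos hcap]
          have hpre := prefix_update (cleanL rest) (merged ++ [PySem.Str.strip token])
          have hlen2 : mc.toNat = (merged ++ [PySem.Str.strip token]).length := by
            simp only [List.length_append, List.length_cons, List.length_nil] at *
            omega
          rw [hlen2, (List.prefix_iff_eq_take.mp hpre).symm]
        · rw [if_neg hcap]
          exact ih _ (by simp only [List.length_append, List.length_cons, List.length_nil] at *; omega)

theorem mergeLoop_append (mc : Int) : ∀ (xs ys merged : List String),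
    mergeLoop mc merged (xs ++ ys) =
      (if (mergeLoop mc merged xs).2 then mergeLoop mc merged xs
       else mergeLoop mc (mergeLoop mc merged xs).1 ys) := by
  intro xs
  induction xs with
  | nil => intro ys merged; simp [mergeLoop]
  | cons x xs ih =>
    intro ys merged
    simp only [List.cons_append, mergeLoop]
    split
    · exact ih ys merged
    · split
      · simp
      · exact ih ys _

theorem mergeLoop_of_no_valid (mc : Int) : ∀ (ts merged : List String),
    (∀ t ∈ ts, PySem.Str.len (PySem.Str.strip t) < 2) →
    mergeLoop mc merged ts = (merged, false) := by
  intro ts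
  induction ts with
  | nil => intro merged _; rfl
  | cons x ts ih =>
    intro merged h
    simp only [mergeLoop]
    rw [if_pos (Or.inl (h x (by simp)))]
    exact ih merged (fun t ht => h t (by simp [ht]))

theorem cleanL_eq_nil (ts : List String)
    (h : ∀ t ∈ ts, PySem.Str.len (PySem.Str.strip t) < 2) : cleanL ts = [] := by
  simp only [cleanL, List.filter_eq_nil_iff, List.mem_map, decide_eq_true_eq]
  rintro a ⟨t, ht, rfl⟩
  have := h t ht
  omega

theorem slice_nil_to (b : Int) : PySem.List.slice ([] : List String) none (some b) = [] := by
  rw [List.eq_nil_iff_forall_not_mem]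
  intro x hx
  exact absurd (PySem.List.mem_of_mem_slice _ _ _ hx) List.not_mem_nil

-- ofList xs is strictly increasing under first-occurrence index in xs
theorem ofList_pairwise_fIdx (xs : List String) :
    (PySem.Set.ofList xs).Pairwise (fun a b => fIdx xs a < fIdx xs b) := by
  induction xs using List.reverseRecOn with
  | nil => simp [PySem.Set.ofList_nil]
  | append_singleton xs x ih =>
    rw [PySem.Set.ofList_append_singleton]
    have hkey : ∀ t ∈ xs, fIdx (xs ++ [x]) t = fIdx xs t := by
      intro t ht
      simp only [fIdx]
      rw [PySem.List.index?_append_of_mem _ ht]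
    by_cases hx : x ∈ xs
    · rw [PySem.Set.add_of_mem (by rw [PySem.Set.mem_ofList _ _]; exact hx)]
      refine ih.imp_of_mem ?_
      intro a b ha hb hab
      rw [hkey a ((PySem.Set.mem_ofList _ _).mp ha), hkey b ((PySem.Set.mem_ofList _ _).mp hb)]
      exact hab
    · rw [PySem.Set.add_of_not_mem (by rw [PySem.Set.mem_ofList _ _]; exact hx)]
      rw [List.pairwise_append]
      refine ⟨ih.imp_of_mem ?_, List.pairwise_singleton _ _, ?_⟩
      · intro a b ha hb hab
        rw [hkey a ((PySem.Set.mem_ofList _ _).mp ha), hkey b ((PySem.Set.mem_ofList _ _).mp hb)]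
        exact hab
      · intro a ha b hb
        rw [List.mem_singleton] at hb
        rw [hb]
        have haxs : a ∈ xs := (PySem.Set.mem_ofList _ _).mp ha
        rw [hkey a haxs]
        have hxidx : fIdx (xs ++ [x]) x = (xs.length : Int) := by
          simp only [fIdx]
          rw [PySem.List.index?_append_singleton_self xs x hx]
          simp
        rw [hxidx]
        obtain ⟨k, hk⟩ := Option.isSome_iff_exists.mp ((PySem.List.index?_isSome_iff xs a).mpr haxs)
        obtain ⟨hklt, _, _⟩ := PySem.List.getElem_of_index?_eq_some hk
        simp only [fIdx, hk, Option.getD_some]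
        exact_mod_cast hklt

-- B's sort re-creates first-occurrence (insertion) order
theorem sorted_ofList_fIdx (cleaned : List String) :
    PySem.List.sorted (PySem.Set.ofList cleaned)
      (fun t => (((PySem.List.index? cleaned t).getD 0 : Nat) : Int)) false
      = PySem.Set.ofList cleaned :=
  PySem.List.sorted_eq_of_perm_of_pairwise_lt _ _ _ (List.Perm.refl _) (ofList_pairwise_fIdx cleaned)

-- ===== VERDICT (by name: the statement is the Claim_ definition above) =====
theorem merge_keywords_py_spec : Claim_unchanged_merge_keywords_py := by
  intro p s mc _ hnd
  show merge_keywords_py p s mc = merge_keywords_py_alt p s mc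
  by_cases h0 : mc ≤ 0
  · have hno : ∀ t ∈ p ++ s, PySem.Str.len (PySem.Str.strip t) < 2 := by
      intro t ht
      by_contra hge
      exact hnd ⟨h0, t, ht, by omega⟩
    have hcl : ((p ++ s).map (fun x => PySem.Str.strip x)).filter (fun t => 2 ≤ PySem.Str.len t) = ([] : List String) :=
      cleanL_eq_nil (p ++ s) hno
    have hA : merge_keywords_py p s mc = [] := by
      simp only [merge_keywords_py,
        mergeLoop_of_no_valid mc p [] (fun t ht => hno t (List.mem_append_left _ ht)),
        mergeLoop_of_no_valid mc s [] (fun t ht => hno t (List.mem_append_right _ ht))]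
      simp
    have hB : merge_keywords_py_alt p s mc = [] := by
      simp only [merge_keywords_py_alt, hcl, PySem.Set.ofList_nil]
      rw [show PySem.List.sorted ([] : List String) (fun t => (((PySem.List.index? ([] : List String) t).getD 0 : Nat) : Int)) false = [] from rfl]
      exact slice_nil_to mc
    rw [hA, hB]
  · have h1 : merge_keywords_py p s mc = (mergeLoop mc [] (p ++ s)).1 := by
      simp only [merge_keywords_py, mergeLoop_append mc p s [], apply_ite Prod.fst]
    rw [h1, mergeLoop_eq_take mc (p ++ s) [] (by simp; omega)]
    show _ = merge_keywords_py_alt p s mc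
    simp only [merge_keywords_py_alt]
    rw [sorted_ofList_fIdx]
    rw [PySem.List.slice_to _ (by omega : (0:Int) ≤ mc), ← PySem.Set.update_nil_left]
    rfl

theorem merge_keywords_py_changed : Claim_changed_merge_keywords_py := by
  unfold Claim_changed_merge_keywords_py; decide
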